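-- pv_equiv track=rewrite | github.com/seongwon980/htop-gpu | htop_gpu/cli.py | _proc_col_bounds
-- ===== SOURCE A (Python) =====
-- _PROC_COLS_ALL = [
--     # (key,         label,      width, align, modes)
--     ("gpu_index",   "GPU",       3, "right", ("gpu",)),
--     ("pid",         "PID",       7, "right", ("gpu", "cpu", "mem")),
--     ("user",        "USER",      5, "left",  ("gpu", "cpu", "mem")),
--     ("gpu_mem",     "GPU MEM",  10, "right", ("gpu",)),
--     ("cpu_percent", "%CPU",      5, "right", ("cpu", "mem")),
--     ("rss_bytes",   "RES",       6, "right", ("cpu", "mem")),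
--     ("elapsed_sec", "ELAPSED",  10, "right", ("gpu", "cpu", "mem")),
--     ("cmd_short",   "COMMAND",   7, "left",  ("gpu", "cpu", "mem")),
-- ]
--
-- def _proc_cols_for(mode: str) -> list[tuple[str, str, int, str]]:
--     """Pick the visible column set for the current mode (gpu/cpu/mem)."""
--     return [(k, l, w, a) for (k, l, w, a, modes) in _PROC_COLS_ALL if mode in modes]
--
-- _PROC_COL_GAP = 2
--
-- def _proc_col_bounds(inner_w: int, mode: str = "gpu") -> list[tuple[int, int, str]]:
--     """Return (content_col_start, content_col_end, sort_key) — 0-indexed, inclusive.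
--     Each column's click region includes the trailing gap; the last col
--     (COMMAND) extends to the end of the inner content area."""
--     cols = _proc_cols_for(mode)
--     bounds = []
--     offset = 0
--     n = len(cols)
--     for i, (key, _label, width, _align) in enumerate(cols):
--         is_last = i == n - 1
--         if is_last:
--             end = max(offset, inner_w - 1)
--         else:
--             end = offset + width + _PROC_COL_GAP - 1
--         bounds.append((offset, end, key))
--         offset = end + 1
--     return bounds
-- ===== SOURCE B (Python) =====
-- _PROC_COLS_ALL = [
--     ("gpu_index",   "GPU",       3, "right", ("gpu",)),
--     ("pid",         "PID",       7, "right", ("gpu", "cpu", "mem")),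
--     ("user",        "USER",      5, "left",  ("gpu", "cpu", "mem")),
--     ("gpu_mem",     "GPU MEM",  10, "right", ("gpu",)),
--     ("cpu_percent", "%CPU",      5, "right", ("cpu", "mem")),
--     ("rss_bytes",   "RES",       6, "right", ("cpu", "mem")),
--     ("elapsed_sec", "ELAPSED",  10, "right", ("gpu", "cpu", "mem")),
--     ("cmd_short",   "COMMAND",   7, "left",  ("gpu", "cpu", "mem")),
-- ]
--
-- def _proc_cols_for(mode: str) -> list[tuple[str, str, int, str]]:
--     return [(k, l, w, a) for (k, l, w, a, modes) in _PROC_COLS_ALL if mode in modes]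
--
-- _PROC_COL_GAP = 2
--
-- def _proc_col_bounds(inner_w: int, mode: str = "gpu") -> list[tuple[int, int, str]]:
--     cols = _proc_cols_for(mode)
--     n = len(cols)
--     widths = [w for (_k, _l, w, _a) in cols]
--     starts = [sum(widths[:i]) + _PROC_COL_GAP * i for i in range(n)]
--     return [(s,
--              max(s, inner_w - 1) if i == n - 1 else s + w + _PROC_COL_GAP - 1,
--              k)
--             for i, ((k, _l, w, _a), s) in enumerate(zip(cols, starts))]
-- ===== Notes on version B (the rewrite author's own statement) =====
-- stated objective: alternative
-- what changed: B replaces A's single loop threading a running offset accumulator by a precomputed table of per-column start offsets (prefix sums of width+gap) and a separate mapping pass deriving each column's end bound.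
import Mathlib
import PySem

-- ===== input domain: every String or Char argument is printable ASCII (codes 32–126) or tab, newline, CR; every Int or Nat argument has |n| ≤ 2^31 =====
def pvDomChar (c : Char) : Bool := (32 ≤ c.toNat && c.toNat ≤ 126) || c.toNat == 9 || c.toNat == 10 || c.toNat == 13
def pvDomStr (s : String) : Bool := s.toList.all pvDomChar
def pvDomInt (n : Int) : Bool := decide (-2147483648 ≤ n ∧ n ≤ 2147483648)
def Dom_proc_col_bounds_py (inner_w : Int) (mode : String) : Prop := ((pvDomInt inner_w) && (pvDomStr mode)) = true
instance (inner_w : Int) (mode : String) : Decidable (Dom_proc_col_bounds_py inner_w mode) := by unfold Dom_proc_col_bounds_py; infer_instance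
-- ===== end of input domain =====

-- B replaces A's running offset accumulator by a precomputed start-offset table (prefix sums) and a single mapping pass; objective: alternative decomposition (same cost).

-- ===== PORT A =====
-- module constant _PROC_COLS_ALL: (key, label, width, align, modes)
def pvProcColsAll : List (String × String × Int × String × List String) :=
  [ ("gpu_index",   "GPU",       3, "right", ["gpu"]),
    ("pid",         "PID",       7, "right", ["gpu", "cpu", "mem"]),
    ("user",        "USER",      5, "left",  ["gpu", "cpu", "mem"]),
    ("gpu_mem",     "GPU MEM",  10, "right", ["gpu"]),
    ("cpu_percent", "%CPU",      5, "right", ["cpu", "mem"]),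
    ("rss_bytes",   "RES",       6, "right", ["cpu", "mem"]),
    ("elapsed_sec", "ELAPSED",  10, "right", ["gpu", "cpu", "mem"]),
    ("cmd_short",   "COMMAND",   7, "left",  ["gpu", "cpu", "mem"]) ]

-- _proc_cols_for: list comprehension with a membership filter
def pvProcColsFor (mode : String) : List (String × String × Int × String) :=
  (pvProcColsAll.filter (fun r => r.2.2.2.2.contains mode)).map
    (fun r => (r.1, r.2.1, r.2.2.1, r.2.2.2.1))

def proc_col_bounds_py (inner_w : Int) (mode : String) : List (Int × Int × String) :=
  let cols := pvProcColsFor mode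
  let n : Int := cols.length
  let st := (PySem.List.enumerate cols 0).foldl
    (fun (st : List (Int × Int × String) × Int) p =>
      let i := p.1
      let key := p.2.1
      let width := p.2.2.2.1
      let offset := st.2
      let isLast := i == n - 1
      let e := if isLast then max offset (inner_w - 1) else offset + width + 2 - 1
      (st.1 ++ [(offset, e, key)], e + 1))
    ([], 0)
  st.1

-- ===== PORT B =====
def proc_col_bounds_py_alt (inner_w : Int) (mode : String) : List (Int × Int × String) :=
  let cols := pvProcColsFor mode
  let n : Int := cols.length
  let widths := cols.map (fun c => c.2.2.1)
  let starts := (PySem.List.pyRange 0 n 1).map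
    (fun i => (PySem.List.slice widths none (some i)).sum + 2 * i)
  (PySem.List.enumerate (cols.zip starts) 0).map
    (fun p =>
      let i := p.1
      let k := p.2.1.1
      let w := p.2.1.2.2.1
      let s := p.2.2
      (s, if i == n - 1 then max s (inner_w - 1) else s + w + 2 - 1, k))

-- ===== PRECONDITION & SPEC =====
def Spec_proc_col_bounds_py (inner_w : Int) (mode : String) (out : List (Int × Int × String)) : Prop := out = proc_col_bounds_py_alt inner_w mode
instance (inner_w : Int) (mode : String) (out : List (Int × Int × String)) : Decidable (Spec_proc_col_bounds_py inner_w mode out) := by unfold Spec_proc_col_bounds_py; infer_instance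

-- ===== CLAIM (what is proved, stated in full; the proofs are below) =====
def Claim_equal_proc_col_bounds_py : Prop := ∀ (inner_w : Int) (mode : String), Dom_proc_col_bounds_py inner_w mode → Spec_proc_col_bounds_py inner_w mode (proc_col_bounds_py inner_w mode)

-- ===== LEMMAS AND PROOFS =====

-- For each of the four possible visible-column sets both programs compute the same bounds.
theorem pvMain (inner_w : Int) (mode : String) :
    proc_col_bounds_py inner_w mode = proc_col_bounds_py_alt inner_w mode := by
  by_cases h1 : mode = "gpu"
  · subst h1
    simp [proc_col_bounds_py, proc_col_bounds_py_alt, pvProcColsFor, pvProcColsAll,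
      PySem.List.enumerate, PySem.List.pyRange, PySem.List.slice,
      List.range_succ, PySem.List.clampIdx]
  · by_cases h2 : mode = "cpu"
    · subst h2
      simp [proc_col_bounds_py, proc_col_bounds_py_alt, pvProcColsFor, pvProcColsAll,
        PySem.List.enumerate, PySem.List.pyRange, PySem.List.slice,
        List.range_succ, PySem.List.clampIdx]
    · by_cases h3 : mode = "mem"
      · subst h3
        simp [proc_col_bounds_py, proc_col_bounds_py_alt, pvProcColsFor, pvProcColsAll,
          PySem.List.enumerate, PySem.List.pyRange, PySem.List.slice,
          List.range_succ, PySem.List.clampIdx]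
      · have hc : pvProcColsFor mode = [] := by
          have hf : pvProcColsAll.filter (fun r => r.2.2.2.2.contains mode) = [] := by
            rw [List.filter_eq_nil_iff]
            intro r hr
            fin_cases hr <;> simp [h1, h2, h3]
          unfold pvProcColsFor
          rw [hf]
          rfl
        simp [proc_col_bounds_py, proc_col_bounds_py_alt, hc, PySem.List.pyRange]

-- ===== VERDICT (by name: the statement is the Claim_ definition above) =====
theorem proc_col_bounds_py_spec : Claim_equal_proc_col_bounds_py := by
  intro inner_w mode _
  exact pvMain inner_w mode
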